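-- pv_equiv track=rewrite | github.com/altayaman/model-trainer | predictor_v2.py | get_ranges_for_csv
-- ===== SOURCE A (Python) =====
-- def get_ranges_for_csv(input_df_size_, insertion_chunk_size_):
--     ranges_ = [(0,0,insertion_chunk_size_)]
--     input_df_size_ = input_df_size_ - insertion_chunk_size_
--     c = 1
--     while(True):
--         if(input_df_size_ >= insertion_chunk_size_):
--             input_df_size_ = input_df_size_ - insertion_chunk_size_
--             #range_ = (c * insertion_chunk_size_ + 1, (c+1) * insertion_chunk_size_ - 1 + 2)
--             range_ = (1, (c+1) * insertion_chunk_size_ + 1, insertion_chunk_size_)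
--             ranges_.extend([range_])
--             c = c + 1
--             if(input_df_size_ == 0):
--                 break
--         else:
--             if(input_df_size_-1 < c*insertion_chunk_size_):
--                 #range_ = (c * insertion_chunk_size_ + 1, (c*insertion_chunk_size_) + input_df_size_ - 1 + 2)
--                 range_ = (1, ((c)*insertion_chunk_size_) + 1, input_df_size_)
--             else:
--                 #range_ = (c * insertion_chunk_size_ + 1, input_df_size_ - 1 + 2)
--                 range_ = (1, input_df_size_ + 1, 0)
--             ranges_.extend([range_])
--             break
--
--     return ranges_
-- ===== SOURCE B (Python) =====
-- def get_ranges_for_csv(input_df_size_, insertion_chunk_size_):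
--     K = insertion_chunk_size_
--     S = input_df_size_ - K
--     if S < K:
--         return [(0, 0, K), (1, K + 1, S)]
--     q, r = divmod(S, K)
--     ranges_ = [(0, 0, K)]
--     ranges_ += [(1, (c + 1) * K + 1, K) for c in range(1, q + 1)]
--     if r != 0:
--         ranges_.append((1, (q + 1) * K + 1, r))
--     return ranges_
-- ===== Notes on version B (the rewrite author's own statement) =====
-- stated objective: simpler
-- what changed: Replaces A's subtract-one-chunk-at-a-time while-loop by a closed form: one divmod gives the number q of full chunks and the remainder r, the full-chunk tuples come from a single range comprehension and the partial tuple is appended iff r != 0.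
-- outside the precondition, e.g. on get_ranges_for_csv(0, 0): A returns [(0, 0, 0), (1, 1, 0)], B raises ZeroDivisionError; on get_ranges_for_csv(-3, -1): A returns [(0, 0, -1), (1, 0, -2)], B returns [(0, 0, -1), (1, 0, -2)]
import Mathlib
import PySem

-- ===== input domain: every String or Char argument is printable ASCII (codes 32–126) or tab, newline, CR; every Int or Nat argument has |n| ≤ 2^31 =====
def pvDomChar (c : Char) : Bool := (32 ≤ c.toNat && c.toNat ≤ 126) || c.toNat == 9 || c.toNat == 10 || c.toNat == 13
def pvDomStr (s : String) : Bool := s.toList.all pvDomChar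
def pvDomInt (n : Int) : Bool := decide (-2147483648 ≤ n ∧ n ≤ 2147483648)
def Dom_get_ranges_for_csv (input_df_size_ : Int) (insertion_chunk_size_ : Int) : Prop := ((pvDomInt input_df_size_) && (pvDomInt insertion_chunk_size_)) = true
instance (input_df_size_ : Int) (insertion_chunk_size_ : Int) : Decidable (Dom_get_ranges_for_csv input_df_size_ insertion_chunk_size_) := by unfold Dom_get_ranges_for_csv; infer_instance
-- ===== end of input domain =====

-- B replaces A's chunk-by-chunk subtraction loop by a single divmod plus a range comprehension: simpler, same output.

-- ===== PORT A =====
-- A's 'while True' loop; fuel only makes it total in Lean (A diverges for most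
-- insertion_chunk_size_ ≤ 0, excluded by Pre_; inside Pre_ the fuel is proved sufficient).
def pyLoopA (fuel : Nat) (K : Int) (S : Int) (c : Int) (acc : List (Int × Int × Int)) : List (Int × Int × Int) :=
  match fuel with
  | 0 => acc
  | fuel + 1 =>
    if S ≥ K then
      let S' := S - K
      let acc' := acc ++ [(1, (c + 1) * K + 1, K)]
      if S' = 0 then acc' else pyLoopA fuel K S' (c + 1) acc'
    else
      if S - 1 < c * K then acc ++ [(1, c * K + 1, S)]
      else acc ++ [(1, S + 1, 0)]

def get_ranges_for_csv (input_df_size_ : Int) (insertion_chunk_size_ : Int) : List (Int × Int × Int) :=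
  pyLoopA (input_df_size_.natAbs + insertion_chunk_size_.natAbs + 2) insertion_chunk_size_
    (input_df_size_ - insertion_chunk_size_) 1 [(0, 0, insertion_chunk_size_)]

-- ===== PORT B =====
def get_ranges_for_csv_alt (input_df_size_ : Int) (insertion_chunk_size_ : Int) : List (Int × Int × Int) :=
  let K := insertion_chunk_size_
  let S := input_df_size_ - K
  if S < K then [(0, 0, K), (1, K + 1, S)]
  else
    match PySem.Int.divmod? S K with
    | none => []  -- Python B raises ZeroDivisionError here (K = 0); excluded by Pre_
    | some (q, r) =>
      ([(0, 0, K)] ++ (PySem.List.pyRange 1 (q + 1) 1).map (fun c => (1, (c + 1) * K + 1, K)))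
        ++ (if r ≠ 0 then [(1, (q + 1) * K + 1, r)] else [])

-- ===== PRECONDITION & SPEC =====
-- Pre_ restricts to the natural domain, a positive chunk size: for insertion_chunk_size_ ≤ 0
-- A's while-loop fails to terminate for almost every size (e.g. any positive size with chunk 0);
-- on the few such inputs where A does return (cited in claim.json) B raises at (0,0) and
-- happens to agree elsewhere.
def Pre_get_ranges_for_csv (input_df_size_ : Int) (insertion_chunk_size_ : Int) : Prop :=
  0 < insertion_chunk_size_
instance (input_df_size_ : Int) (insertion_chunk_size_ : Int) : Decidable (Pre_get_ranges_for_csv input_df_size_ insertion_chunk_size_) := by unfold Pre_get_ranges_for_csv; infer_instance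

def pvWitness_get_ranges_for_csv : Int × Int := (10, 3)

def Spec_get_ranges_for_csv (input_df_size_ : Int) (insertion_chunk_size_ : Int) (out : List (Int × Int × Int)) : Prop := out = get_ranges_for_csv_alt input_df_size_ insertion_chunk_size_
instance (input_df_size_ : Int) (insertion_chunk_size_ : Int) (out : List (Int × Int × Int)) : Decidable (Spec_get_ranges_for_csv input_df_size_ insertion_chunk_size_ out) := by unfold Spec_get_ranges_for_csv; infer_instance

-- ===== CLAIM (what is proved, stated in full; the proofs are below) =====
def Claim_equal_get_ranges_for_csv : Prop := ∀ (input_df_size_ : Int) (insertion_chunk_size_ : Int), Dom_get_ranges_for_csv input_df_size_ insertion_chunk_size_ → Pre_get_ranges_for_csv input_df_size_ insertion_chunk_size_ → Spec_get_ranges_for_csv input_df_size_ insertion_chunk_size_ (get_ranges_for_csv input_df_size_ insertion_chunk_size_)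

-- ===== LEMMAS AND PROOFS =====

-- What the loop computes from state (S, c), closed form (proof-only helper).
def gSpec (K S c : Int) : List (Int × Int × Int) :=
  if S < K then [(1, c * K + 1, S)]
  else
    ((PySem.List.pyRange c (c + PySem.Int.floordiv S K) 1).map (fun i => (1, (i + 1) * K + 1, K)))
      ++ (if PySem.Int.mod S K = 0 then [] else
            [(1, (c + PySem.Int.floordiv S K) * K + 1, PySem.Int.mod S K)])

lemma floordiv_sub_self (S K : Int) (hK : 0 < K) :
    PySem.Int.floordiv (S - K) K = PySem.Int.floordiv S K - 1 := by
  rw [PySem.Int.floordiv_eq_ediv_of_pos hK, PySem.Int.floordiv_eq_ediv_of_pos hK]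
  have h := Int.add_mul_ediv_right S (-1) (ne_of_gt hK)
  have : S - K = S + (-1) * K := by ring
  rw [this, h]; ring

lemma mod_sub_self (S K : Int) (hK : 0 < K) :
    PySem.Int.mod (S - K) K = PySem.Int.mod S K := by
  rw [PySem.Int.mod_eq_emod_of_pos hK, PySem.Int.mod_eq_emod_of_pos hK]
  exact Int.sub_emod_right S K

lemma loopA_eq (K : Int) (hK : 0 < K) :
    ∀ (n fuel : Nat) (S c : Int) (acc : List (Int × Int × Int)),
      1 ≤ c → S.toNat ≤ n → n < fuel →
      pyLoopA fuel K S c acc = acc ++ gSpec K S c := by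
  intro n
  induction n with
  | zero =>
    intro fuel S c acc hc hSn hf
    obtain ⟨f, rfl⟩ : ∃ f, fuel = f + 1 := ⟨fuel - 1, by omega⟩
    have hS : S < K := by omega
    have hcond : S - 1 < c * K := by nlinarith
    simp [pyLoopA, gSpec, not_le.mpr hS, hS, hcond]
  | succ m ih =>
    intro fuel S c acc hc hSn hf
    obtain ⟨f, rfl⟩ : ∃ f, fuel = f + 1 := ⟨fuel - 1, by omega⟩
    by_cases hS : S ≥ K
    · have hq1 : 1 ≤ PySem.Int.floordiv S K := by
        rw [PySem.Int.le_floordiv_iff_mul_le hK]; omega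
      have hfm : PySem.Int.floordiv S K * K + PySem.Int.mod S K = S :=
        PySem.Int.floordiv_mul_add_mod S K
      by_cases hz : S - K = 0
      · -- exactly one full chunk left
        have hSK : S = K := by omega
        have hq : PySem.Int.floordiv S K = 1 := by
          rw [PySem.Int.floordiv_eq_iff_of_pos hK]; constructor <;> nlinarith
        have hr : PySem.Int.mod S K = 0 := by rw [hq] at hfm; omega
        simp [pyLoopA, hS, hz, gSpec, not_lt.mpr hS, hq, hr,
              PySem.List.pyRange_one_singleton]
      · -- recurse on S - K
        have hrec := ih f (S - K) (c + 1) (acc ++ [(1, (c + 1) * K + 1, K)])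
          (by omega) (by omega) (by omega)
        have hstep : pyLoopA (f + 1) K S c acc
            = pyLoopA f K (S - K) (c + 1) (acc ++ [(1, (c + 1) * K + 1, K)]) := by
          simp [pyLoopA, hS, hz]
        rw [hstep, hrec, List.append_assoc]
        congr 1
        -- gSpec K S c = chunk :: gSpec K (S-K) (c+1)
        have hfd := floordiv_sub_self S K hK
        have hmd := mod_sub_self S K hK
        by_cases hS' : S - K < K
        · -- q = 1, r = S - K ≠ 0
          have hq : PySem.Int.floordiv S K = 1 := by
            rw [PySem.Int.floordiv_eq_iff_of_pos hK]; constructor <;> nlinarith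
          have hr : PySem.Int.mod S K = S - K := by rw [hq] at hfm; omega
          simp [gSpec, not_lt.mpr hS, hS', hq, hr, hz,
                PySem.List.pyRange_one_singleton]
        · have hcons : PySem.List.pyRange c (c + PySem.Int.floordiv S K) 1
              = c :: PySem.List.pyRange (c + 1) (c + PySem.Int.floordiv S K) 1 :=
            PySem.List.pyRange_one_cons (by omega)
          have harith : c + 1 + (PySem.Int.floordiv S K - 1) = c + PySem.Int.floordiv S K := by
            ring
          simp [gSpec, not_lt.mpr hS, not_lt.mpr (le_of_not_gt hS'), hfd, hmd, hcons, harith]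
    · -- S < K : final partial tuple
      have hS : S < K := not_le.mp hS
      have hcond : S - 1 < c * K := by nlinarith
      simp [pyLoopA, gSpec, not_le.mpr hS, hS, hcond]

-- ===== VERDICT (by name: the statement is the Claim_ definition above) =====
theorem get_ranges_for_csv_spec : Claim_equal_get_ranges_for_csv := by
  intro N K hdom hK
  unfold Spec_get_ranges_for_csv
  have hK' : (0 : Int) < K := hK
  have hloop := loopA_eq K hK' ((N - K).toNat) (N.natAbs + K.natAbs + 2) (N - K) 1
    [(0, 0, K)] (by omega) (le_refl _) (by omega)
  show get_ranges_for_csv N K = _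
  unfold get_ranges_for_csv
  rw [hloop]
  by_cases hS : N - K < K
  · simp [get_ranges_for_csv_alt, gSpec, hS, one_mul]
  · have hKne : K ≠ 0 := ne_of_gt hK'
    have hdm : PySem.Int.divmod? (N - K) K
        = some (PySem.Int.floordiv (N - K) K, PySem.Int.mod (N - K) K) := by
      simp [PySem.Int.divmod?, PySem.Int.floordiv, PySem.Int.mod, hKne]
    have h1q : (1 : Int) + PySem.Int.floordiv (N - K) K = PySem.Int.floordiv (N - K) K + 1 := by
      ring
    simp only [get_ranges_for_csv_alt, gSpec, if_neg hS, hdm, h1q]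
    by_cases hr : PySem.Int.mod (N - K) K = 0
    · simp [hr]
    · simp [hr]
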